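-- pv_equiv track=rewrite | github.com/DataDog/datadog-agent | tasks/libs/testing/flakes.py | is_strict_child
-- ===== SOURCE A (Python) =====
-- def is_strict_child(parent, child):
--     """Check if a test is a child of another test
--
--     Check if a test is a child of another test
--     For example with the test "TestEKSSuite/TestCPU" and the test "TestEKSSuite/TestCPU/TestCPUUtilization"
--     this method should return True
--
--     Args:
--         parent (str): Test name to check if it is the parent
--         child (str): Test name to check if it is the child
--
--     """
--
--     splitted_parent = parent.split('/')
--     splitted_child = child.split('/')
--     if len(splitted_parent) >= len(splitted_child):
--         return False
--     for i in range(len(splitted_parent)):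
--         if splitted_parent[i] != splitted_child[i]:
--             return False
--     return True
-- ===== SOURCE B (Python) =====
-- def is_strict_child(parent, child):
--     """Check if a test is a child of another test (strict descendant by '/' components)."""
--     return child.startswith(parent + '/')
-- ===== Notes on version B (the rewrite author's own statement) =====
-- stated objective: simpler
-- what changed: Replaces the split-on-'/' plus length-guard plus index loop with a single prefix test child.startswith(parent + '/'), whose appended separator enforces both the component boundary and strictness.
import Mathlib
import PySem

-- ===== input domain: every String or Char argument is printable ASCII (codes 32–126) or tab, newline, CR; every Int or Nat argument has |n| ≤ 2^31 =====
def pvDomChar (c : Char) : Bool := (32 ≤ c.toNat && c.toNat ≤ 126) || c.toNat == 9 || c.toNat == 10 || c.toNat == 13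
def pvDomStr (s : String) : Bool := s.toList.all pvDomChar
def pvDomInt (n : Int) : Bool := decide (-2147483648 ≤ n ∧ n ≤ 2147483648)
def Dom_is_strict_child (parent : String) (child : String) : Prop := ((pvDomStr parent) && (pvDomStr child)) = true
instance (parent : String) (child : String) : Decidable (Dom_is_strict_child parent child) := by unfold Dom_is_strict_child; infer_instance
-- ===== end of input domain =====

-- B replaces A's split/guard/loop with one prefix test child.startswith(parent + '/'); objective: simpler.

-- ===== PORT A =====
-- the 'for i in range(len(splitted_parent))' loop with its early 'return False'
def is_strict_child_loop (sp sc : List (List Char)) (i : Nat) : Bool :=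
  if h : i < sp.length then
    if sp[i] ≠ sc.getD i [] then false   -- sc.getD: guard 'len(sp) >= len(sc) → return False' already ensured i < len(sc), so the default is never read
    else is_strict_child_loop sp sc (i + 1)
  else true
termination_by sp.length - i

def is_strict_child (parent : String) (child : String) : Bool :=
  let splitted_parent := PySem.Chars.splitOn parent.toList ['/']   -- parent.split('/')
  let splitted_child := PySem.Chars.splitOn child.toList ['/']     -- child.split('/')
  if splitted_parent.length ≥ splitted_child.length then false
  else is_strict_child_loop splitted_parent splitted_child 0

-- ===== PORT B =====
def is_strict_child_alt (parent : String) (child : String) : Bool :=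
  PySem.Chars.startswith child.toList (parent.toList ++ ['/'])   -- child.startswith(parent + '/')

-- ===== PRECONDITION & SPEC =====
def Spec_is_strict_child (parent : String) (child : String) (out : Bool) : Prop := out = is_strict_child_alt parent child
instance (parent : String) (child : String) (out : Bool) : Decidable (Spec_is_strict_child parent child out) := by unfold Spec_is_strict_child; infer_instance

-- ===== CLAIM (what is proved, stated in full; the proofs are below) =====
def Claim_equal_is_strict_child : Prop := ∀ (parent : String) (child : String), Dom_is_strict_child parent child → Spec_is_strict_child parent child (is_strict_child parent child)

-- ===== LEMMAS AND PROOFS =====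

-- clean structural model of s.split(ch) for a single-character separator
def pvSplit (ch : Char) : List Char → List (List Char)
  | [] => [[]]
  | c :: r => if c = ch then [] :: pvSplit ch r else (pvSplit ch r).modifyHead (c :: ·)

-- '/'.join for a single-character separator
def pvJoin (ch : Char) : List (List Char) → List Char
  | [] => []
  | [a] => a
  | a :: b :: t => a ++ ch :: pvJoin ch (b :: t)

theorem pvSplit_ne_nil (ch : Char) (s : List Char) : pvSplit ch s ≠ [] := by
  cases s with
  | nil => simp [pvSplit]
  | cons c r =>
    simp only [pvSplit]
    split
    · simp
    · cases h : pvSplit ch r with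
      | nil => exact absurd h (pvSplit_ne_nil ch r)
      | cons a t => simp [List.modifyHead]

theorem splitOn_go_eq (ch : Char) (fuel : Nat) (l cur : List Char) (acc : List (List Char))
    (h : l.length < fuel) :
    PySem.Chars.splitOn.go [ch] fuel l cur acc
      = acc.reverse ++ (pvSplit ch l).modifyHead (cur.reverse ++ ·) := by
  induction fuel generalizing l cur acc with
  | zero => omega
  | succ fuel ih =>
    cases l with
    | nil => simp [PySem.Chars.splitOn.go, pvSplit]
    | cons c rest =>
      simp only [PySem.Chars.splitOn.go]
      by_cases hc : c = ch
      · subst hc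
        have hp : List.isPrefixOf [c] (c :: rest) = true := by simp [List.isPrefixOf]
        rw [if_pos hp]
        rw [show List.drop [c].length (c :: rest) = rest from rfl]
        rw [ih rest [] (cur.reverse :: acc) (by simpa using Nat.lt_of_succ_lt_succ h)]
        simp only [pvSplit]
        cases pvSplit c rest <;> simp [List.modifyHead]
      · have hp : List.isPrefixOf [ch] (c :: rest) = false := by
          simp [List.isPrefixOf]; intro hh; exact absurd hh.symm hc
        rw [if_neg (by simp [hp])]
        rw [ih rest (c :: cur) acc (by simpa using Nat.lt_of_succ_lt_succ h)]
        simp only [pvSplit, if_neg hc]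
        cases hs : pvSplit ch rest with
        | nil => exact absurd hs (pvSplit_ne_nil ch rest)
        | cons a t => simp [List.modifyHead]

theorem splitOn_eq_pvSplit (ch : Char) (s : List Char) :
    PySem.Chars.splitOn s [ch] = pvSplit ch s := by
  show PySem.Chars.splitOn.go [ch] (s.length + 1) s [] [] = _
  rw [splitOn_go_eq ch (s.length + 1) s [] [] (by omega)]
  cases h : pvSplit ch s with
  | nil => exact absurd h (pvSplit_ne_nil ch s)
  | cons a t => simp [List.modifyHead]

theorem pvJoin_pvSplit (ch : Char) (s : List Char) : pvJoin ch (pvSplit ch s) = s := by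
  induction s with
  | nil => simp [pvSplit, pvJoin]
  | cons c r ih =>
    simp only [pvSplit]
    by_cases hc : c = ch
    · rw [if_pos hc]
      cases h : pvSplit ch r with
      | nil => exact absurd h (pvSplit_ne_nil ch r)
      | cons a t => rw [h] at ih; simp [pvJoin, ih, hc]
    · rw [if_neg hc]
      cases h : pvSplit ch r with
      | nil => exact absurd h (pvSplit_ne_nil ch r)
      | cons a t =>
        rw [h] at ih
        cases t with
        | nil => simp [List.modifyHead, pvJoin] at ih ⊢; simp [ih]
        | cons b t' => simp [List.modifyHead, pvJoin] at ih ⊢; simp [ih]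

theorem pvSplit_append (ch : Char) (a b : List Char) :
    pvSplit ch (a ++ ch :: b) = pvSplit ch a ++ pvSplit ch b := by
  induction a with
  | nil => simp [pvSplit]
  | cons c a' ih =>
    simp only [List.cons_append, pvSplit, ih]
    by_cases hc : c = ch
    · simp [hc]
    · rw [if_neg hc, if_neg hc]
      cases h : pvSplit ch a' with
      | nil => exact absurd h (pvSplit_ne_nil ch a')
      | cons x t => simp [List.modifyHead]

theorem pvJoin_append (ch : Char) (l1 l2 : List (List Char)) (h1 : l1 ≠ []) (h2 : l2 ≠ []) :
    pvJoin ch (l1 ++ l2) = pvJoin ch l1 ++ ch :: pvJoin ch l2 := by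
  induction l1 with
  | nil => exact absurd rfl h1
  | cons a t ih =>
    cases t with
    | nil =>
      cases l2 with
      | nil => exact absurd rfl h2
      | cons b t2 => simp [pvJoin]
    | cons b t' =>
      have := ih (by simp)
      simp only [List.cons_append, pvJoin] at this ⊢
      rw [this]
      simp

theorem loop_true_iff (sp sc : List (List Char)) (i : Nat) :
    is_strict_child_loop sp sc i = true ↔
      ∀ j, i ≤ j → (h : j < sp.length) → sp[j] = sc.getD j [] := by
  rw [is_strict_child_loop]
  split
  · rename_i h
    split
    · rename_i hne
      simp only [Bool.false_eq_true, false_iff]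
      intro hall
      exact hne (hall i le_rfl h)
    · rename_i heq
      rw [not_not] at heq
      rw [loop_true_iff sp sc (i + 1)]
      constructor
      · intro hall j hij hj
        rcases Nat.eq_or_lt_of_le hij with rfl | hlt
        · exact heq
        · exact hall j hlt hj
      · intro hall j hij hj
        exact hall j (by omega) hj
  · rename_i h
    simp only [true_iff]
    intro j hij hj
    omega
termination_by sp.length - i

theorem main_chars (p c : List Char) :
    (if (pvSplit '/' p).length ≥ (pvSplit '/' c).length then false
     else is_strict_child_loop (pvSplit '/' p) (pvSplit '/' c) 0)
    = PySem.Chars.startswith c (p ++ ['/']) := by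
  by_cases hpre : (p ++ ['/']) <+: c
  · obtain ⟨r, hr⟩ := hpre
    have hc : c = p ++ '/' :: r := by simpa using hr.symm
    subst hc
    rw [pvSplit_append]
    have hlt : (pvSplit '/' p).length < (pvSplit '/' p ++ pvSplit '/' r).length := by
      simp only [List.length_append]
      have := pvSplit_ne_nil '/' r
      cases h : pvSplit '/' r with
      | nil => exact absurd h this
      | cons x t => simp
    rw [if_neg (by omega)]
    have hsw : PySem.Chars.startswith (p ++ '/' :: r) (p ++ ['/']) = true := by
      rw [PySem.Chars.startswith_iff]; exact ⟨r, by simp⟩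
    rw [hsw, loop_true_iff]
    intro j hij hj
    rw [List.getD_eq_getElem _ _ (by omega)]
    rw [List.getElem_append_left hj]
  · have hsw : PySem.Chars.startswith c (p ++ ['/']) = false := by
      cases h : PySem.Chars.startswith c (p ++ ['/'])
      · rfl
      · exact absurd ((PySem.Chars.startswith_iff c (p ++ ['/'])).mp h) hpre
    rw [hsw]
    split
    · rfl
    · rename_i hlen
      rw [not_le] at hlen
      cases hloop : is_strict_child_loop (pvSplit '/' p) (pvSplit '/' c) 0
      · rfl
      · exfalso
        apply hpre
        have hall := (loop_true_iff _ _ 0).mp hloop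
        have htake : pvSplit '/' p = (pvSplit '/' c).take (pvSplit '/' p).length := by
          apply List.ext_getElem
          · simp; omega
          · intro j hj1 hj2
            have hj : j < (pvSplit '/' p).length := hj1
            rw [List.getElem_take]
            rw [hall j (Nat.zero_le j) hj]
            rw [List.getD_eq_getElem _ _ (by omega)]
        have hsplitc : pvSplit '/' c
            = pvSplit '/' p ++ (pvSplit '/' c).drop (pvSplit '/' p).length := by
          conv_lhs => rw [← List.take_append_drop (pvSplit '/' p).length (pvSplit '/' c)]
          rw [← htake]
        have hdropne : (pvSplit '/' c).drop (pvSplit '/' p).length ≠ [] := by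
          simp only [ne_eq, List.drop_eq_nil_iff]; omega
        have hc : c = pvJoin '/' (pvSplit '/' p ++ (pvSplit '/' c).drop (pvSplit '/' p).length) := by
          rw [← hsplitc, pvJoin_pvSplit]
        rw [pvJoin_append '/' _ _ (pvSplit_ne_nil '/' p) hdropne, pvJoin_pvSplit] at hc
        refine ⟨pvJoin '/' ((pvSplit '/' c).drop (pvSplit '/' p).length), ?_⟩
        conv_rhs => rw [hc]
        simp

-- ===== VERDICT (by name: the statement is the Claim_ definition above) =====
theorem is_strict_child_spec : Claim_equal_is_strict_child := by
  intro parent child _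
  unfold Spec_is_strict_child is_strict_child is_strict_child_alt
  simp only [splitOn_eq_pvSplit]
  exact main_chars parent.toList child.toList
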